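-- pv_equiv track=rewrite | github.com/EkaterinaPogodina/hse_python_2021 | golovachev_seminar_17.09.py | stupid
-- ===== SOURCE A (Python) =====
-- def stupid(test):
--     best_cnt = None
--     best_sym = ""
--     prev_symbols = ""
--     cnt_symbols = []
--     for i in range(len(test)):
--         for j in range(len(test[i])):
--             if test[i][j] not in prev_symbols:
--                 prev_symbols += test[i][j]
--                 cnt_symbols.append(1)
--             else:
--                 for x in range(len(prev_symbols)):
--                     if prev_symbols[x] == test[i][j]:
--                         cnt_symbols[x] += 1
--     for i in range(len(cnt_symbols)):
--         if (best_cnt is None) or (cnt_symbols[i] > best_cnt) or \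
--            (cnt_symbols[i] == best_cnt) and (prev_symbols[i] < best_sym):
--             best_cnt = cnt_symbols[i]
--             best_sym = prev_symbols[i]
--     return best_sym
-- ===== SOURCE B (Python) =====
-- def stupid(test):
--     chars = sorted(c for s in test for c in s)
--     best_sym, best_cnt = "", 0
--     cur_sym, cur_cnt = "", 0
--     for c in chars:
--         if c == cur_sym:
--             cur_cnt += 1
--         else:
--             cur_sym, cur_cnt = c, 1
--         if cur_cnt > best_cnt:
--             best_sym, best_cnt = cur_sym, cur_cnt
--     return best_sym
-- ===== Notes on version B (the rewrite author's own statement) =====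
-- stated objective: faster
-- what changed: Replaced A's first-occurrence count table (built with a substring-membership scan and an inner position scan over the distinct-symbol string for every character) plus a final argmax pass by flattening all characters, sorting them once, and doing a single run-length sweep with a strict '>' best update, which yields the smallest most-frequent symbol directly.
import Mathlib
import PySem

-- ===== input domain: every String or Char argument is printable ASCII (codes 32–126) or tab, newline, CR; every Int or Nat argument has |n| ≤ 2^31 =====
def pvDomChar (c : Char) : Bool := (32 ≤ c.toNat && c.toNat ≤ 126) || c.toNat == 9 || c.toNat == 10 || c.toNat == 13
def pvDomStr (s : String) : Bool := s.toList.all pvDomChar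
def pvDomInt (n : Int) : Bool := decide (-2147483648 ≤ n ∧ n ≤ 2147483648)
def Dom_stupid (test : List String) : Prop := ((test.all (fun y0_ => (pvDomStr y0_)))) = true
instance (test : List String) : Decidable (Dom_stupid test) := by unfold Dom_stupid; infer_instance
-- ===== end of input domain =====

-- B replaces A's first-occurrence count table plus final argmax pass by sorting all characters
-- and doing one run-length sweep over the sorted list (alternative algorithm, same exact result).

-- ===== PORT A =====
-- inner loop "for x in range(len(prev_symbols)): if prev_symbols[x] == c: cnt_symbols[x] += 1"
def pvBump (prev : List Char) (cnt : List Int) (c : Char) : List Int :=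
  (prev.zip cnt).map (fun q => if q.1 = c then q.2 + 1 else q.2)

-- body of the two nested counting loops, processing one character
def pvCountStep (st : List Char × List Int) (c : Char) : List Char × List Int :=
  if c ∈ st.1 then (st.1, pvBump st.1 st.2 c) else (st.1 ++ [c], st.2 ++ [1])

-- body of the selection loop "for i in range(len(cnt_symbols)): …"
def pvSelStep (st : Option Int × String) (p : Char × Int) : Option Int × String :=
  match st.1 with
  | none => (some p.2, String.ofList [p.1])
  | some b =>
      if p.2 > b ∨ (p.2 = b ∧ String.ofList [p.1] < st.2) then (some p.2, String.ofList [p.1])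
      else st

def stupid (test : List String) : String :=
  let pc := test.foldl (fun st s => s.toList.foldl pvCountStep st) ([], [])
  ((pc.1.zip pc.2).foldl pvSelStep (none, "")).2

-- ===== PORT B =====
-- loop body of Source B's sweep; state = (best_sym, best_cnt, cur_sym, cur_cnt)
def pvSweepStep (st : String × Int × String × Int) (c : Char) : String × Int × String × Int :=
  match st with
  | (bs, bc, cs, cc) =>
    let cur := if String.ofList [c] = cs then (cs, cc + 1) else (String.ofList [c], (1 : Int))
    if cur.2 > bc then (cur.1, cur.2, cur.1, cur.2) else (bs, bc, cur.1, cur.2)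

def stupid_alt (test : List String) : String :=
  let chars := PySem.List.sorted (test.flatMap String.toList) (fun c => c) false
  (chars.foldl pvSweepStep ("", 0, "", 0)).1

-- ===== PRECONDITION & SPEC =====
def Spec_stupid (test : List String) (out : String) : Prop := out = stupid_alt test
instance (test : List String) (out : String) : Decidable (Spec_stupid test out) := by unfold Spec_stupid; infer_instance

-- ===== CLAIM (what is proved, stated in full; the proofs are below) =====
def Claim_equal_stupid : Prop := ∀ (test : List String), Dom_stupid test → Spec_stupid test (stupid test)

-- ===== LEMMAS AND PROOFS =====

-- helper definitions used only by the proofs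
def pvIns (p : List Char) (a : Char) : List Char := if a ∈ p then p else p ++ [a]

-- lexicographic key (-count, symbol): the returned pair is the key-minimal one
def pvKey (p : Char × Int) : Lex (Int × Char) := toLex (-p.2, p.1)

def pvAmin (p : Char × Int) (l : List (Char × Int)) : Char × Int :=
  l.foldl (fun acc q => if pvKey q < pvKey acc then q else acc) p

def pvRunStep (st : String × Int) (p : Char × Int) : String × Int :=
  if p.2 > st.2 then (String.ofList [p.1], p.2) else st

def pvRunPairs : List Char → List (Char × Int)
  | [] => []
  | c :: t =>
      (c, ((1 + (t.takeWhile (fun x => x == c)).length : Nat) : Int)) ::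
        pvRunPairs (t.dropWhile (fun x => x == c))
termination_by l => l.length
decreasing_by
  simpa using Nat.lt_succ_of_le (t.dropWhile_sublist (p := fun x => x == c)).length_le

theorem pvKey_lt_iff (q p : Char × Int) :
    pvKey q < pvKey p ↔ p.2 < q.2 ∨ (q.2 = p.2 ∧ q.1 < p.1) := by
  unfold pvKey
  rw [Prod.Lex.lt_iff]
  simp only [ofLex_toLex]
  constructor
  · rintro (h | ⟨h1, h2⟩)
    · exact Or.inl (by omega)
    · exact Or.inr ⟨by omega, h2⟩
  · rintro (h | ⟨h1, h2⟩)
    · exact Or.inl (by omega)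
    · exact Or.inr ⟨by omega, h2⟩

theorem pvKey_inj {p q : Char × Int} (h : pvKey p = pvKey q) : p = q := by
  unfold pvKey at h
  have h' := toLex_inj.mp h
  have h1 : -p.2 = -q.2 := congrArg Prod.fst h'
  have h2 : p.1 = q.1 := congrArg Prod.snd h'
  exact Prod.ext h2 (by omega)

theorem pv_singleton_lt (c c' : Char) : (String.ofList [c'] < String.ofList [c]) ↔ c' < c := by
  simp [String.lt_iff_toList_lt, List.cons_lt_cons_iff]

theorem pv_singleton_ne (c c' : Char) (h : c' ≠ c) : String.ofList [c'] ≠ String.ofList [c] := by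
  intro hs; exact h (by simpa using congrArg String.toList hs)

theorem pv_empty_ne_singleton (c : Char) : "" ≠ String.ofList [c] := by
  intro hs
  have := congrArg String.toList hs
  simp at this

theorem pv_nodup_snoc (p : List Char) (a : Char) (hp : p.Nodup) (h : a ∉ p) :
    (p ++ [a]).Nodup := by
  rw [List.nodup_append]
  refine ⟨hp, List.nodup_singleton a, ?_⟩
  intro x hx b hb he
  exact h ((he.trans (List.mem_singleton.mp hb)) ▸ hx)

theorem pv_foldl_flatten (test : List String) (st : List Char × List Int) :
    test.foldl (fun st s => s.toList.foldl pvCountStep st) st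
      = (test.flatMap String.toList).foldl pvCountStep st := by
  induction test generalizing st with
  | nil => rfl
  | cons s rest ih => simp [List.flatMap_cons, List.foldl_append, ih]

theorem pv_ins_nodup_mem (l : List Char) : ∀ (p : List Char), p.Nodup →
    (l.foldl pvIns p).Nodup ∧ ∀ c, c ∈ l.foldl pvIns p ↔ c ∈ p ∨ c ∈ l := by
  induction l with
  | nil => intro p hp; simpa using hp
  | cons a l ih =>
    intro p hp
    rw [List.foldl_cons]
    by_cases h : a ∈ p
    · rw [show pvIns p a = p by simp [pvIns, h]]
      obtain ⟨h1, h2⟩ := ih p hp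
      refine ⟨h1, fun c => ?_⟩
      rw [h2]
      constructor
      · rintro (hc | hc)
        · exact Or.inl hc
        · exact Or.inr (List.mem_cons_of_mem _ hc)
      · rintro (hc | hc)
        · exact Or.inl hc
        · rcases List.mem_cons.mp hc with rfl | hc
          · exact Or.inl h
          · exact Or.inr hc
    · rw [show pvIns p a = p ++ [a] by simp [pvIns, h]]
      obtain ⟨h1, h2⟩ := ih (p ++ [a]) (pv_nodup_snoc p a hp h)
      refine ⟨h1, fun c => ?_⟩
      rw [h2]
      simp only [List.mem_append, List.mem_cons]
      tauto

theorem pvBump_map (f : Char → Int) (a : Char) : ∀ (p : List Char),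
    pvBump p (p.map f) a = p.map (fun c => if c = a then f c + 1 else f c) := by
  intro p
  induction p with
  | nil => rfl
  | cons x p ih =>
    unfold pvBump at ih ⊢
    simp only [List.map_cons, List.zip_cons_cons]
    rw [ih]

theorem pv_phase1 (l : List Char) : ∀ (p : List Char) (f : Char → Int),
    p.Nodup → (∀ c, c ∉ p → f c = 0) →
    l.foldl pvCountStep (p, p.map f)
      = (l.foldl pvIns p, (l.foldl pvIns p).map (fun c => f c + (l.count c : Int))) := by
  induction l with
  | nil => intro p f _ _; simp
  | cons a l ih =>
    intro p f hp hf
    rw [List.foldl_cons, List.foldl_cons]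
    by_cases h : a ∈ p
    · rw [show pvCountStep (p, p.map f) a
          = (p, p.map (fun c => f c + if c = a then 1 else 0)) from by
        simp only [pvCountStep, if_pos (show a ∈ (p, p.map f).1 from h)]
        refine congrArg _ ?_
        rw [pvBump_map]
        refine List.map_congr_left fun c _ => ?_
        by_cases hc : c = a <;> simp [hc]]
      rw [show pvIns p a = p by simp [pvIns, h]]
      rw [ih p _ hp (fun c hc => by
        have hca : c ≠ a := fun he => hc (he ▸ h)
        simp [hf c hc, hca])]
      refine congrArg _ ?_
      refine List.map_congr_left fun c _ => ?_
      by_cases hc : c = a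
      · subst hc; simp [List.count_cons]; push_cast; ring
      · simp [List.count_cons, hc, Ne.symm hc]
    · rw [show pvCountStep (p, p.map f) a = (p ++ [a], p.map f ++ [1]) from by
        simp [pvCountStep, h]]
      rw [show pvIns p a = p ++ [a] by simp [pvIns, h]]
      have hmap : p.map f ++ [1] = (p ++ [a]).map (fun c => if c = a then 1 else f c) := by
        rw [List.map_append]
        refine congrArg₂ _ ?_ (by simp)
        refine (List.map_congr_left fun c hc => ?_).symm
        have hca : c ≠ a := fun he => h (he ▸ hc)
        simp [hca]
      rw [hmap, ih (p ++ [a]) _ (pv_nodup_snoc p a hp h)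
        (fun c hc => by
          simp only [List.mem_append, List.mem_cons] at hc
          push_neg at hc
          simp [hc.2, hf c hc.1])]
      refine congrArg _ ?_
      refine List.map_congr_left fun c _ => ?_
      by_cases hc : c = a
      · subst hc
        simp [List.count_cons, hf c h]
        push_cast; ring
      · simp [List.count_cons, hc, Ne.symm hc]

theorem pv_zip_self_map (f : Char → Int) : ∀ (p : List Char),
    p.zip (p.map f) = p.map (fun c => (c, f c)) := by
  intro p
  induction p with
  | nil => rfl
  | cons x p ih => simp [ih]

theorem pv_amin_cons (p q : Char × Int) (l : List (Char × Int)) :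
    pvAmin p (q :: l) = pvAmin (if pvKey q < pvKey p then q else p) l := rfl

theorem pv_selA_fold (l : List (Char × Int)) : ∀ (c : Char) (b : Int),
    l.foldl pvSelStep (some b, String.ofList [c])
      = (some (pvAmin (c, b) l).2, String.ofList [(pvAmin (c, b) l).1]) := by
  induction l with
  | nil => intro c b; rfl
  | cons q l ih =>
    intro c b
    rw [List.foldl_cons, pv_amin_cons]
    have hcond : (q.2 > b ∨ (q.2 = b ∧ String.ofList [q.1] < String.ofList [c]))
        ↔ pvKey q < pvKey (c, b) := by
      rw [pvKey_lt_iff, pv_singleton_lt]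
    by_cases h : pvKey q < pvKey (c, b)
    · rw [show pvSelStep (some b, String.ofList [c]) q = (some q.2, String.ofList [q.1]) from by
        simp only [pvSelStep]
        rw [if_pos (hcond.mpr h)]]
      rw [if_pos h]
      exact ih q.1 q.2
    · rw [show pvSelStep (some b, String.ofList [c]) q = (some b, String.ofList [c]) from by
        simp only [pvSelStep]
        rw [if_neg (fun hx => h (hcond.mp hx))]]
      rw [if_neg h]
      exact ih c b

theorem pv_amin_mem (l : List (Char × Int)) : ∀ (p : Char × Int), pvAmin p l ∈ p :: l := by
  induction l with
  | nil => intro p; simp [pvAmin]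
  | cons q l ih =>
    intro p
    rw [pv_amin_cons]
    by_cases h : pvKey q < pvKey p
    · rw [if_pos h]
      exact List.mem_cons_of_mem _ (ih q)
    · rw [if_neg h]
      rcases List.mem_cons.mp (ih p) with he | hm
      · rw [he]; exact List.mem_cons_self
      · exact List.mem_cons_of_mem _ (List.mem_cons_of_mem _ hm)

theorem pv_amin_le (l : List (Char × Int)) : ∀ (p q : Char × Int), q ∈ p :: l →
    pvKey (pvAmin p l) ≤ pvKey q := by
  induction l with
  | nil =>
    intro p q hq
    rcases List.mem_cons.mp hq with rfl | hm
    · exact le_refl _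
    · cases hm
  | cons r t ih =>
    intro p q hq
    rw [pv_amin_cons]
    by_cases h : pvKey r < pvKey p
    · rw [if_pos h]
      rcases List.mem_cons.mp hq with rfl | hm
      · exact le_trans (ih r r List.mem_cons_self) (le_of_lt h)
      · exact ih r q hm
    · rw [if_neg h]
      rcases List.mem_cons.mp hq with rfl | hm
      · exact ih q q List.mem_cons_self
      · rcases List.mem_cons.mp hm with rfl | hm2
        · exact le_trans (ih p p List.mem_cons_self) (not_lt.mp h)
        · exact ih p q (List.mem_cons_of_mem _ hm2)

theorem pv_sweep_replicate (m : Nat) : ∀ (c : Char) (bs : String) (bc k : Int), k ≤ bc →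
    (List.replicate m c).foldl pvSweepStep (bs, bc, String.ofList [c], k)
      = (if (k + m : Int) > bc then String.ofList [c] else bs, max bc (k + m),
         String.ofList [c], k + m) := by
  induction m with
  | zero =>
    intro c bs bc k hk
    simp only [List.replicate, List.foldl_nil, Nat.cast_zero, add_zero]
    rw [if_neg (by omega), max_eq_left hk]
  | succ m ih =>
    intro c bs bc k hk
    rw [List.replicate_succ, List.foldl_cons]
    rw [show pvSweepStep (bs, bc, String.ofList [c], k) c
        = (if k + 1 > bc then (String.ofList [c], k + 1, String.ofList [c], k + 1)
           else (bs, bc, String.ofList [c], k + 1)) from by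
      simp [pvSweepStep]]
    by_cases h : k + 1 > bc
    · rw [if_pos h, ih c _ _ _ (le_refl _)]
      have h1 : ((k + ((m + 1 : Nat) : Int)) > bc) := by push_cast; omega
      rw [if_pos h1]
      rw [show (if k + 1 + (m : Int) > k + 1 then String.ofList [c] else String.ofList [c])
          = String.ofList [c] from by split_ifs <;> rfl]
      simp only [Prod.mk.injEq]
      refine ⟨trivial, ?_, trivial, ?_⟩ <;> push_cast <;> omega
    · rw [if_neg h, ih c bs bc (k + 1) (by omega)]
      rw [show (k + 1 + (m : Int)) = k + ((m + 1 : Nat) : Int) from by push_cast; ring]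

theorem pv_sweep_block (m : Nat) (c : Char) (bs cs0 : String) (bc k0 : Int)
    (hbc : 0 ≤ bc) (hne : cs0 ≠ String.ofList [c]) :
    (c :: List.replicate m c).foldl pvSweepStep (bs, bc, cs0, k0)
      = (if ((1 + m : Nat) : Int) > bc then String.ofList [c] else bs, max bc ((1 + m : Nat) : Int),
         String.ofList [c], ((1 + m : Nat) : Int)) := by
  rw [show ((1 + m : Nat) : Int) = 1 + (m : Int) from by push_cast; ring]
  rw [List.foldl_cons]
  rw [show pvSweepStep (bs, bc, cs0, k0) c
      = (if (1 : Int) > bc then (String.ofList [c], 1, String.ofList [c], (1 : Int))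
         else (bs, bc, String.ofList [c], (1 : Int))) from by
    simp only [pvSweepStep]
    rw [if_neg (Ne.symm hne)]]
  by_cases h : (1 : Int) > bc
  · rw [if_pos h, pv_sweep_replicate m c _ _ _ (le_refl _)]
    have hb0 : bc = 0 := by omega
    subst hb0
    rw [show (if (1 : Int) + (m : Int) > 1 then String.ofList [c] else String.ofList [c])
        = String.ofList [c] from by split_ifs <;> rfl]
    rw [if_pos (show (1 : Int) + (m : Int) > 0 from by positivity)]
    exact congrArg₂ Prod.mk rfl (congrArg₂ Prod.mk (by omega) rfl)
  · rw [if_neg h, pv_sweep_replicate m c _ _ _ (by omega)]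

theorem pv_dropWhile_ne (t : List Char) (c : Char) : ∀ (_ : t.Pairwise (· ≤ ·))
    (_ : ∀ y ∈ t, c ≤ y), ∀ x ∈ t.dropWhile (fun y => y == c), x ≠ c := by
  induction t with
  | nil => intro _ _ x hx; cases hx
  | cons a t ih =>
    intro hp hy x hx
    by_cases ha : a = c
    · rw [List.dropWhile_cons_of_pos (by simpa using ha)] at hx
      exact ih (List.Pairwise.sublist (List.sublist_cons_self a t) hp)
        (fun y hy' => hy y (List.mem_cons_of_mem _ hy')) x hx
    · rw [List.dropWhile_cons_of_neg (by simpa using ha)] at hx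
      rcases List.mem_cons.mp hx with rfl | hm
      · exact ha
      · have hca : c ≤ a := hy a List.mem_cons_self
        have hax : a ≤ x := (List.pairwise_cons.mp hp).1 x hm
        intro he
        exact ha (le_antisymm (he ▸ hax) hca)

theorem pv_runPairs_spec (n : Nat) : ∀ (l : List Char), l.length ≤ n → l.Pairwise (· ≤ ·) →
    (∀ q ∈ pvRunPairs l, q.1 ∈ l ∧ q.2 = (l.count q.1 : Int)) ∧
    (∀ c ∈ l, ∃ q ∈ pvRunPairs l, q.1 = c) ∧
    (pvRunPairs l).Pairwise (fun a b => a.1 < b.1) := by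
  induction n with
  | zero =>
    intro l hl _
    rw [List.eq_nil_of_length_eq_zero (Nat.le_zero.mp hl)]
    refine ⟨?_, ?_, ?_⟩
    · intro q hq; rw [pvRunPairs] at hq; cases hq
    · intro c hc; cases hc
    · rw [pvRunPairs]; exact List.Pairwise.nil
  | succ n ih =>
    intro l hl hp
    match l with
    | [] =>
      refine ⟨?_, ?_, ?_⟩
      · intro q hq; rw [pvRunPairs] at hq; cases hq
      · intro c hc; cases hc
      · rw [pvRunPairs]; exact List.Pairwise.nil
    | c :: t =>
      have hy : ∀ y ∈ t, c ≤ y := (List.pairwise_cons.mp hp).1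
      have hpt : t.Pairwise (· ≤ ·) := (List.pairwise_cons.mp hp).2
      set tw := t.takeWhile (fun x => x == c) with htw
      set dw := t.dropWhile (fun x => x == c) with hdw
      set m := tw.length with hm
      have htsplit : t = tw ++ dw := (List.takeWhile_append_dropWhile).symm
      have htwrep : tw = List.replicate m c :=
        List.eq_replicate_of_mem (fun b hb => by
          simpa using List.mem_takeWhile_imp hb)
      have hdwne : ∀ x ∈ dw, x ≠ c := pv_dropWhile_ne t c hpt hy
      have hdwsub : ∀ x ∈ dw, x ∈ t := fun x hx => (t.dropWhile_sublist _).subset hx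
      have hdwp : dw.Pairwise (· ≤ ·) := List.Pairwise.sublist (t.dropWhile_sublist _) hpt
      have hdwlen : dw.length ≤ n := by
        have h1 : dw.length ≤ t.length := (t.dropWhile_sublist _).length_le
        simp only [List.length_cons] at hl
        omega
      obtain ⟨ihr1, ihr2, ihr3⟩ := ih dw hdwlen hdwp
      have hdw0 : dw.count c = 0 := by
        rw [List.count_eq_zero]
        intro hmem
        exact hdwne c hmem rfl
      have hcount : ((c :: t).count c : Int) = ((1 + m : Nat) : Int) := by
        rw [show (c :: t).count c = 1 + m from by
          rw [htsplit, htwrep]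
          simp [List.count_cons, List.count_append, List.count_replicate, hdw0]
          omega]
      have hcount2 : ∀ x, x ≠ c → ((c :: t).count x : Int) = (dw.count x : Int) := by
        intro x hx
        rw [show (c :: t).count x = dw.count x from by
          rw [htsplit, htwrep]
          simp [List.count_cons, List.count_append, List.count_replicate, hx, Ne.symm hx]]
      have hrp : pvRunPairs (c :: t) = (c, ((1 + m : Nat) : Int)) :: pvRunPairs dw := by
        rw [pvRunPairs]
      rw [hrp]
      refine ⟨?_, ?_, ?_⟩
      · intro q hq
        rcases List.mem_cons.mp hq with rfl | hmem
        · exact ⟨List.mem_cons_self, hcount.symm⟩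
        · obtain ⟨hq1, hq2⟩ := ihr1 q hmem
          have hqc : q.1 ≠ c := hdwne q.1 hq1
          exact ⟨List.mem_cons_of_mem _ (hdwsub q.1 hq1), by rw [hq2, hcount2 q.1 hqc]⟩
      · intro x hx
        rcases List.mem_cons.mp hx with rfl | hmem
        · exact ⟨(x, ((1 + m : Nat) : Int)), List.mem_cons_self, rfl⟩
        · rw [htsplit] at hmem
          rcases List.mem_append.mp hmem with hm1 | hm2
          · have hxc : x = c := by simpa using List.mem_takeWhile_imp hm1
            subst hxc
            exact ⟨(x, ((1 + m : Nat) : Int)), List.mem_cons_self, rfl⟩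
          · obtain ⟨q, hq, hq1⟩ := ihr2 x hm2
            exact ⟨q, List.mem_cons_of_mem _ hq, hq1⟩
      · rw [List.pairwise_cons]
        refine ⟨?_, ihr3⟩
        intro q hq
        have hq1 : q.1 ∈ dw := (ihr1 q hq).1
        exact lt_of_le_of_ne (hy q.1 (hdwsub q.1 hq1)) (Ne.symm (hdwne q.1 hq1))

theorem pv_sweep_runs (n : Nat) : ∀ (l : List Char), l.length ≤ n → l.Pairwise (· ≤ ·) →
    ∀ (bs cs0 : String) (bc k0 : Int), 0 ≤ bc → (∀ x ∈ l, cs0 ≠ String.ofList [x]) →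
    ∃ cs' k', l.foldl pvSweepStep (bs, bc, cs0, k0)
      = (((pvRunPairs l).foldl pvRunStep (bs, bc)).1,
         ((pvRunPairs l).foldl pvRunStep (bs, bc)).2, cs', k') := by
  induction n with
  | zero =>
    intro l hl _ bs cs0 bc k0 _ _
    rw [List.eq_nil_of_length_eq_zero (Nat.le_zero.mp hl)]
    exact ⟨cs0, k0, by rw [pvRunPairs]; rfl⟩
  | succ n ih =>
    intro l hl hp bs cs0 bc k0 hbc hcs
    match l with
    | [] => exact ⟨cs0, k0, by rw [pvRunPairs]; rfl⟩
    | c :: t =>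
      have hy : ∀ y ∈ t, c ≤ y := (List.pairwise_cons.mp hp).1
      have hpt : t.Pairwise (· ≤ ·) := (List.pairwise_cons.mp hp).2
      set tw := t.takeWhile (fun x => x == c) with htw
      set dw := t.dropWhile (fun x => x == c) with hdw
      set m := tw.length with hm
      have htsplit : t = tw ++ dw := (List.takeWhile_append_dropWhile).symm
      have htwrep : tw = List.replicate m c :=
        List.eq_replicate_of_mem (fun b hb => by
          simpa using List.mem_takeWhile_imp hb)
      have hdwne : ∀ x ∈ dw, x ≠ c := pv_dropWhile_ne t c hpt hy
      have hdwp : dw.Pairwise (· ≤ ·) := List.Pairwise.sublist (t.dropWhile_sublist _) hpt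
      have hdwlen : dw.length ≤ n := by
        have h1 : dw.length ≤ t.length := (t.dropWhile_sublist _).length_le
        simp only [List.length_cons] at hl
        omega
      have hsplit : c :: t = (c :: List.replicate m c) ++ dw := by
        rw [List.cons_append, htsplit, htwrep]
      have hL : List.foldl pvSweepStep (bs, bc, cs0, k0) (c :: t)
          = List.foldl pvSweepStep
              (if ((1 + m : Nat) : Int) > bc then String.ofList [c] else bs,
               max bc ((1 + m : Nat) : Int), String.ofList [c], ((1 + m : Nat) : Int)) dw := by
        conv_lhs => rw [hsplit]
        rw [List.foldl_append, pv_sweep_block m c bs cs0 bc k0 hbc (hcs c List.mem_cons_self)]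
      rw [hL]
      have hrp : pvRunPairs (c :: t) = (c, ((1 + m : Nat) : Int)) :: pvRunPairs dw := by
        rw [pvRunPairs]
      rw [hrp, List.foldl_cons]
      have hstep : pvRunStep (bs, bc) (c, ((1 + m : Nat) : Int))
          = (if ((1 + m : Nat) : Int) > bc then String.ofList [c] else bs,
             max bc ((1 + m : Nat) : Int)) := by
        unfold pvRunStep
        by_cases h : ((1 + m : Nat) : Int) > bc
        · rw [if_pos h, if_pos h]
          exact congrArg _ (by omega)
        · rw [if_neg h, if_neg h]
          exact congrArg _ (by omega)
      rw [hstep]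
      exact ih dw hdwlen hdwp _ (String.ofList [c]) _ _
        (le_trans hbc (le_max_left _ _))
        (fun x hx => pv_singleton_ne x c (Ne.symm (hdwne x hx)))

theorem pv_foldB_amin (l : List (Char × Int)) : ∀ (p : Char × Int),
    (∀ q ∈ l, p.1 < q.1) → l.Pairwise (fun a b => a.1 < b.1) →
    l.foldl pvRunStep (String.ofList [p.1], p.2)
      = (String.ofList [(pvAmin p l).1], (pvAmin p l).2) := by
  induction l with
  | nil => intro p _ _; rfl
  | cons q t ih =>
    intro p hlt hpw
    rw [List.foldl_cons, pv_amin_cons]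
    have hpq : p.1 < q.1 := hlt q List.mem_cons_self
    have hcond : pvKey q < pvKey p ↔ p.2 < q.2 := by
      rw [pvKey_lt_iff]
      constructor
      · rintro (h | ⟨_, h2⟩)
        · exact h
        · exact absurd hpq (not_lt.mpr (le_of_lt h2))
      · exact Or.inl
    by_cases h : pvKey q < pvKey p
    · rw [if_pos h]
      rw [show pvRunStep (String.ofList [p.1], p.2) q = (String.ofList [q.1], q.2) from by
        unfold pvRunStep
        rw [if_pos (hcond.mp h)]]
      exact ih q (List.pairwise_cons.mp hpw).1 (List.pairwise_cons.mp hpw).2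
    · rw [if_neg h]
      rw [show pvRunStep (String.ofList [p.1], p.2) q = (String.ofList [p.1], p.2) from by
        unfold pvRunStep
        rw [if_neg (fun hx => h (hcond.mpr hx))]]
      exact ih p (fun r hr => hlt r (List.mem_cons_of_mem _ hr)) (List.pairwise_cons.mp hpw).2

theorem pv_main (test : List String) : stupid test = stupid_alt test := by
  unfold stupid stupid_alt
  rw [pv_foldl_flatten]
  have h1 := pv_phase1 (test.flatMap String.toList) [] (fun _ => 0) List.nodup_nil
    (fun _ _ => rfl)
  simp only [List.map_nil] at h1
  rw [h1]
  simp only [zero_add]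
  match hcs : test.flatMap String.toList with
  | [] =>
    rw [(PySem.List.sorted_eq_nil_iff [] (fun c => c) false).mpr rfl]
    rfl
  | c0 :: rest =>
    have hPfacts := pv_ins_nodup_mem (c0 :: rest) [] List.nodup_nil
    have hPmem : ∀ x, x ∈ (c0 :: rest).foldl pvIns [] ↔ x ∈ c0 :: rest := by
      intro x
      rw [(hPfacts.2 x)]
      simp
    have hPne : (c0 :: rest).foldl pvIns [] ≠ [] := by
      intro he
      have hx := (hPmem c0).mpr List.mem_cons_self
      rw [he] at hx
      cases hx
    -- B side: sorted list, its runs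
    set s := PySem.List.sorted (c0 :: rest) (fun c => c) false with hs
    have hper : s.Perm (c0 :: rest) := PySem.List.sorted_perm (c0 :: rest) (fun c => c) false
    have hsp : s.Pairwise (· ≤ ·) := by
      simpa using PySem.List.sorted_pairwise (c0 :: rest) (fun c => c)
    have hsne : s ≠ [] := by
      intro he
      have hlen := hper.length_eq
      rw [he] at hlen
      simp at hlen
    obtain ⟨R1, R2, R3⟩ := pv_runPairs_spec s.length s (le_refl _) hsp
    obtain ⟨cs', k', hfold⟩ := pv_sweep_runs s.length s (le_refl _) hsp "" "" 0 0 (le_refl 0)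
      (fun x _ => pv_empty_ne_singleton x)
    rw [hfold]
    have hrne : pvRunPairs s ≠ [] := by
      obtain ⟨c1, s', hseq⟩ := List.exists_cons_of_ne_nil hsne
      obtain ⟨q, hq', _⟩ := R2 c1 (hseq ▸ List.mem_cons_self)
      intro h0
      rw [h0] at hq'
      cases hq'
    match hP : (c0 :: rest).foldl pvIns [] with
    | [] => exact absurd hP hPne
    | d :: P' =>
      match hq : pvRunPairs s with
      | [] => exact absurd hq hrne
      | e :: tB =>
        rw [hq] at R1 R2 R3
        rw [pv_zip_self_map (fun c => ((c0 :: rest).count c : Int)) (d :: P'), List.map_cons,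
          List.foldl_cons]
        rw [show pvSelStep (none, "") (d, ((c0 :: rest).count d : Int))
            = (some ((c0 :: rest).count d : Int), String.ofList [d]) from rfl]
        rw [pv_selA_fold]
        rw [List.foldl_cons]
        have he2 : e.2 = (s.count e.1 : Int) := (R1 e List.mem_cons_self).2
        have he1 : e.1 ∈ s := (R1 e List.mem_cons_self).1
        have hepos : e.2 > 0 := by
          rw [he2]
          exact_mod_cast List.count_pos_iff.mpr he1
        rw [show pvRunStep ("", 0) e = (String.ofList [e.1], e.2) from by
          unfold pvRunStep
          rw [if_pos hepos]]
        rw [pv_foldB_amin tB e (List.pairwise_cons.mp R3).1 (List.pairwise_cons.mp R3).2]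
        -- both sides are now singleton strings of the key-minimal pair of equal pair sets
        have hcnt : ∀ x, (s.count x : Int) = ((c0 :: rest).count x : Int) := by
          intro x
          exact congrArg (fun n : Nat => (n : Int)) (hper.count_eq x)
        have hAB : ∀ r, r ∈ (d :: P').map (fun c => (c, ((c0 :: rest).count c : Int)))
            → r ∈ e :: tB := by
          intro r hr
          obtain ⟨x, hx, rfl⟩ := List.mem_map.mp hr
          have hxcs : x ∈ c0 :: rest := (hPmem x).mp (hP ▸ hx)
          have hxs : x ∈ s := hper.mem_iff.mpr hxcs
          obtain ⟨q2, hq2, hq2x⟩ := R2 x hxs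
          have hq2c := (R1 q2 hq2).2
          have hx2 : q2 = (x, ((c0 :: rest).count x : Int)) := by
            refine Prod.ext hq2x ?_
            rw [hq2c, hq2x]
            exact hcnt x
          rw [← hx2]
          exact hq2
        have hBA : ∀ r, r ∈ e :: tB
            → r ∈ (d :: P').map (fun c => (c, ((c0 :: rest).count c : Int))) := by
          intro r hr
          obtain ⟨hr1, hr2⟩ := R1 r hr
          have hrcs : r.1 ∈ c0 :: rest := hper.mem_iff.mp hr1
          have hrP : r.1 ∈ d :: P' := hP ▸ (hPmem r.1).mpr hrcs
          refine List.mem_map.mpr ⟨r.1, hrP, ?_⟩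
          refine Prod.ext rfl ?_
          rw [hr2]
          exact (hcnt r.1).symm
        have hconsA : (d, ((c0 :: rest).count d : Int)) :: P'.map
              (fun c => (c, ((c0 :: rest).count c : Int)))
            = (d :: P').map (fun c => (c, ((c0 :: rest).count c : Int))) := by
          rw [List.map_cons]
        set pA : Char × Int := (d, ((c0 :: rest).count d : Int)) with hpA
        set lA := P'.map (fun c => (c, ((c0 :: rest).count c : Int))) with hlA
        have haminA : pvAmin pA lA ∈ e :: tB := by
          refine hAB _ ?_
          rw [← hconsA]
          exact pv_amin_mem lA pA
        have haminB : pvAmin e tB ∈ pA :: lA := by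
          rw [hconsA]
          exact hBA _ (pv_amin_mem tB e)
        have hle1 : pvKey (pvAmin pA lA) ≤ pvKey (pvAmin e tB) :=
          pv_amin_le lA pA _ haminB
        have hle2 : pvKey (pvAmin e tB) ≤ pvKey (pvAmin pA lA) :=
          pv_amin_le tB e _ haminA
        have heq : pvAmin pA lA = pvAmin e tB := pvKey_inj (le_antisymm hle1 hle2)
        rw [heq]

-- ===== VERDICT (by name: the statement is the Claim_ definition above) =====
theorem stupid_spec : Claim_equal_stupid := by
  intro test _
  unfold Spec_stupid
  exact pv_main test
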